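-- pv_equiv track=rewrite | github.com/kulmetehan/turkish-diaspora-app | Backend/services/news_service.py | normalize_theme_filters
-- ===== SOURCE A (Python) =====
-- from typing import Any, Dict, List, Mapping, Sequence, Tuple
--
-- ALLOWED_NEWS_THEMES: Tuple[str, ...] = (
--     "politics",
--     "economy",
--     "culture",
--     "religion",
--     "sports",
--     "security",
-- )
--
-- def normalize_theme_filters(values: Sequence[str] | None) -> List[str]:
--     """Normalize requested themes and ensure they belong to the allowlist."""
--
--     normalized: List[str] = []
--     seen: set[str] = set()
--
--     if not values:
--         return normalized
--
--     for raw_value in values: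
--         if not isinstance(raw_value, str):
--             continue
--         parts = raw_value.split(",")
--         for part in parts:
--             candidate = part.strip().lower()
--             if not candidate:
--                 continue
--             if candidate not in ALLOWED_NEWS_THEMES:
--                 allowed = ", ".join(ALLOWED_NEWS_THEMES)
--                 raise ValueError(f"Invalid theme '{candidate}'. Allowed values: {allowed}.")
--             if candidate in seen:
--                 continue
--             seen.add(candidate)
--             normalized.append(candidate)
--
--     return normalized
-- ===== SOURCE B (Python) =====
-- from typing import List, Sequence, Tuple
--
-- ALLOWED_NEWS_THEMES: Tuple[str, ...] = (
--     "politics",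
--     "economy",
--     "culture",
--     "religion",
--     "sports",
--     "security",
-- )
--
-- def normalize_theme_filters(values: Sequence[str] | None) -> List[str]:
--     """Normalize requested themes and ensure they belong to the allowlist."""
--     if not values:
--         return []
--     tokens = [
--         c
--         for raw in values
--         if isinstance(raw, str)
--         for c in (part.strip().lower() for part in raw.split(","))
--         if c
--     ]
--     for c in tokens:
--         if c not in ALLOWED_NEWS_THEMES:
--             allowed = ", ".join(ALLOWED_NEWS_THEMES)
--             raise ValueError(f"Invalid theme '{c}'. Allowed values: {allowed}.")
--     # dedup without any seen-set: every valid token is one of the 6 allowed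
--     # themes, so take the allowed themes that occur and order them by the
--     # index of their first occurrence in the token stream.
--     present = [t for t in ALLOWED_NEWS_THEMES if t in tokens]
--     present.sort(key=tokens.index)
--     return present
-- ===== Notes on version B (the rewrite author's own statement) =====
-- stated objective: alternative
-- what changed: A dedups with a seen-set threaded through a fused clean/validate/append loop; B keeps no seen state at all: after flattening and a validation scan it selects the allowed themes that occur among the tokens and sorts that 6-element selection by first-occurrence index (tokens.index), which reproduces first-occurrence order.
import Mathlib
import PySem

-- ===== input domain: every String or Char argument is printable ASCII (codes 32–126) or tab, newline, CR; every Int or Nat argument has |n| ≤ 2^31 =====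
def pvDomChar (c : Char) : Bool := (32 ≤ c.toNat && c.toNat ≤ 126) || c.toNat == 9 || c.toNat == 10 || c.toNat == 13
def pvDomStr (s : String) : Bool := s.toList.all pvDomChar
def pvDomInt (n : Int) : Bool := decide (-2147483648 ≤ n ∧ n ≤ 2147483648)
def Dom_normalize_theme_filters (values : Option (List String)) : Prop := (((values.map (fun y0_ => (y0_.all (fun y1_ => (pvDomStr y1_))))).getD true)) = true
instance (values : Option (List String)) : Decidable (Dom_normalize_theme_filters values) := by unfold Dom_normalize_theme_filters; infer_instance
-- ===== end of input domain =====

-- B keeps no seen-set: it selects the allowed themes occurring among the cleaned tokens and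
-- sorts that selection by first-occurrence index; same return value everywhere A returns
-- (both raise the identical ValueError on invalid themes, excluded by Pre_).

-- ===== PORT A =====
def pvAllowedThemes : List String :=
  ["politics", "economy", "culture", "religion", "sports", "security"]

-- `part.strip().lower()`
def pvClean (p : String) : String := PySem.Str.lower (PySem.Str.strip p)

-- `raw_value.split(",")`; split? is `some` exactly because the separator "," is non-empty
def pvSplitComma (s : String) : List String := (PySem.Str.split? s ",").getD []

-- A's inner `for part in parts` loop; `none` = the explicit `raise ValueError`.
-- (`isinstance(raw_value, str)` is always true under the type convention.)
def pvAParts : List String → List String → PySem.Set String → Option (List String × PySem.Set String)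
  | [], normalized, seen => some (normalized, seen)
  | p :: rest, normalized, seen =>
    let candidate := pvClean p
    if candidate = "" then pvAParts rest normalized seen
    else if ¬ (candidate ∈ pvAllowedThemes) then none
    else if PySem.Set.contains seen candidate then pvAParts rest normalized seen
    else pvAParts rest (normalized ++ [candidate]) (PySem.Set.add seen candidate)

-- A's outer `for raw_value in values` loop
def pvAVals : List String → List String → PySem.Set String → Option (List String)
  | [], normalized, _ => some normalized
  | v :: rest, normalized, seen =>
    match pvAParts (pvSplitComma v) normalized seen with
    | none => none
    | some (n', s') => pvAVals rest n' s'

def normalize_theme_filters (values : Option (List String)) : List String :=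
  match values with
  | none => []
  | some vs =>
    if vs = [] then []   -- `if not values: return normalized`
    else (pvAVals vs [] PySem.Set.empty).getD []   -- getD unreachable under Pre_ (raise excluded)

-- ===== PORT B =====
-- B's flattening comprehension of cleaned non-empty tokens
def pvBTokens (vs : List String) : List String :=
  vs.flatMap (fun raw => ((pvSplitComma raw).map pvClean).filter (fun c => c != ""))

def normalize_theme_filters_alt (values : Option (List String)) : List String :=
  match values with
  | none => []
  | some vs =>
    if vs = [] then []
    else
      let tokens := pvBTokens vs
      -- the validation scan; `some _` = the `raise ValueError` (excluded by Pre_)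
      match tokens.find? (fun c => ¬ (c ∈ pvAllowedThemes)) with
      | some _ => []
      | none =>
        -- `present = [t for t in ALLOWED_NEWS_THEMES if t in tokens]; present.sort(key=tokens.index)`
        -- (tokens.index never raises here: every t taken satisfies t ∈ tokens, so getD 0 is exact)
        let present := pvAllowedThemes.filter (fun t => t ∈ tokens)
        PySem.List.sorted present (fun t => (PySem.List.index? tokens t).getD 0) false

-- ===== PRECONDITION & SPEC =====
-- Pre_ excludes exactly the inputs on which A raises ValueError: some cleaned, non-empty
-- candidate is outside the allowlist (B raises the identical ValueError there too).
def Pre_normalize_theme_filters (values : Option (List String)) : Prop :=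
  ∀ vs, values = some vs → ∀ raw ∈ vs, ∀ p ∈ pvSplitComma raw,
    PySem.Str.lower (PySem.Str.strip p) = "" ∨
    PySem.Str.lower (PySem.Str.strip p) ∈
      (["politics", "economy", "culture", "religion", "sports", "security"] : List String)
instance (values : Option (List String)) : Decidable (Pre_normalize_theme_filters values) := by
  unfold Pre_normalize_theme_filters; infer_instance

def pvWitness_normalize_theme_filters : Option (List String) :=
  some ["Politics, economy", " sports ", "politics"]

def Spec_normalize_theme_filters (values : Option (List String)) (out : List String) : Prop := out = normalize_theme_filters_alt values
instance (values : Option (List String)) (out : List String) : Decidable (Spec_normalize_theme_filters values out) := by unfold Spec_normalize_theme_filters; infer_instance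

-- ===== CLAIM (what is proved, stated in full; the proofs are below) =====
def Claim_equal_normalize_theme_filters : Prop := ∀ (values : Option (List String)), Dom_normalize_theme_filters values → Pre_normalize_theme_filters values → Spec_normalize_theme_filters values (normalize_theme_filters values)

-- ===== LEMMAS AND PROOFS =====

-- the dedup step A performs per valid, non-duplicate candidate
def pvStep (st : List String × PySem.Set String) (c : String) : List String × PySem.Set String :=
  if PySem.Set.contains st.2 c then st else (st.1 ++ [c], PySem.Set.add st.2 c)

theorem pvAParts_eq_foldl (parts : List String) (n : List String) (s : PySem.Set String)
    (h : ∀ p ∈ parts, pvClean p = "" ∨ pvClean p ∈ pvAllowedThemes) :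
    pvAParts parts n s =
      some (((parts.map pvClean).filter (fun c => c != "")).foldl pvStep (n, s)) := by
  induction parts generalizing n s with
  | nil => rfl
  | cons p rest ih =>
    have hp := h p (by simp)
    have hrest : ∀ q ∈ rest, pvClean q = "" ∨ pvClean q ∈ pvAllowedThemes :=
      fun q hq => h q (by simp [hq])
    by_cases hc : pvClean p = ""
    · simp [pvAParts, hc, ih _ _ hrest]
    · have hmem : pvClean p ∈ pvAllowedThemes := hp.resolve_left hc
      by_cases hs : pvClean p ∈ s
      · simp [pvAParts, hc, hmem, hs, ih _ _ hrest, pvStep]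
      · simp [pvAParts, hc, hmem, hs, ih _ _ hrest, pvStep]

theorem pvAVals_eq_foldl (vs : List String) (n : List String) (s : PySem.Set String)
    (h : ∀ raw ∈ vs, ∀ p ∈ pvSplitComma raw,
      pvClean p = "" ∨ pvClean p ∈ pvAllowedThemes) :
    pvAVals vs n s = some ((pvBTokens vs).foldl pvStep (n, s)).1 := by
  induction vs generalizing n s with
  | nil => rfl
  | cons v rest ih =>
    have hv : ∀ p ∈ pvSplitComma v, pvClean p = "" ∨ pvClean p ∈ pvAllowedThemes :=
      fun p hp => h v (by simp) p hp
    have hrest : ∀ raw ∈ rest, ∀ p ∈ pvSplitComma raw,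
        pvClean p = "" ∨ pvClean p ∈ pvAllowedThemes :=
      fun raw hraw => h raw (by simp [hraw])
    simp only [pvAVals, pvAParts_eq_foldl _ _ _ hv, pvBTokens, List.flatMap_cons,
      List.foldl_append]
    exact ih _ _ hrest

-- the paired fold with equal components is the Set.ofList fold on both components
theorem pvFoldl_step_diag (cs : List String) (x : List String) :
    cs.foldl pvStep (x, x) = (cs.foldl PySem.Set.add x, cs.foldl PySem.Set.add x) := by
  induction cs generalizing x with
  | nil => rfl
  | cons c rest ih =>
    by_cases hc : c ∈ x
    · simp [pvStep, PySem.Set.add, hc, ih]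
    · simp [pvStep, PySem.Set.add, hc, ih]

theorem pvFind?_none (cs : List String)
    (h : ∀ c ∈ cs, c ∈ pvAllowedThemes) :
    cs.find? (fun c => ¬ (c ∈ pvAllowedThemes)) = none := by
  apply List.find?_eq_none.mpr
  intro c hc
  simp [h c hc]

-- a member's first-occurrence index is a valid position, hence < length
theorem pvIndex_lt (xs : List String) (a : String) (ha : a ∈ xs) :
    (PySem.List.index? xs a).getD 0 < xs.length := by
  obtain ⟨k, hk⟩ := Option.isSome_iff_exists.mp ((PySem.List.index?_isSome_iff xs a).mpr ha)
  obtain ⟨hlt, -, -⟩ := PySem.List.getElem_of_index?_eq_some hk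
  rw [hk]
  simpa using hlt

-- first-occurrence indices are strictly increasing along set(xs) = dedup xs
theorem pvOfList_pairwise_index (xs : List String) :
    (PySem.Set.ofList xs).Pairwise
      (fun a b => (PySem.List.index? xs a).getD 0 < (PySem.List.index? xs b).getD 0) := by
  induction xs using List.reverseRecOn with
  | nil => simp [PySem.Set.ofList_eq_foldl]
  | append_singleton xs x ih =>
    have hofl : PySem.Set.ofList (xs ++ [x]) = PySem.Set.add (PySem.Set.ofList xs) x := by
      simp [PySem.Set.ofList_eq_foldl]
    by_cases hx : x ∈ xs
    · have hxs : x ∈ PySem.Set.ofList xs := (PySem.Set.mem_ofList xs x).mpr hx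
      have hadd : PySem.Set.add (PySem.Set.ofList xs) x = PySem.Set.ofList xs := by
        simp [PySem.Set.add, hxs]
      rw [hofl, hadd]
      refine ih.imp_of_mem ?_
      intro a b ha hb hab
      rw [PySem.List.index?_append_of_mem _ ((PySem.Set.mem_ofList xs a).mp ha),
          PySem.List.index?_append_of_mem _ ((PySem.Set.mem_ofList xs b).mp hb)]
      exact hab
    · have hxs : x ∉ PySem.Set.ofList xs := fun h => hx ((PySem.Set.mem_ofList xs x).mp h)
      have hadd : PySem.Set.add (PySem.Set.ofList xs) x = PySem.Set.ofList xs ++ [x] := by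
        simp [PySem.Set.add, hxs]
      rw [hofl, hadd, List.pairwise_append]
      refine ⟨ih.imp_of_mem ?_, by simp, ?_⟩
      · intro a b ha hb hab
        rw [PySem.List.index?_append_of_mem _ ((PySem.Set.mem_ofList xs a).mp ha),
            PySem.List.index?_append_of_mem _ ((PySem.Set.mem_ofList xs b).mp hb)]
        exact hab
      · intro a ha b hb
        have hb' : b = x := by simpa using hb
        rw [hb']
        have ha' := (PySem.Set.mem_ofList xs a).mp ha
        rw [PySem.List.index?_append_of_mem _ ha',
            PySem.List.index?_append_singleton_self xs x hx]
        simpa using pvIndex_lt xs a ha'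

-- A's dedup list equals B's sorted selection of present allowed themes
theorem pvDedup_eq_sorted (tokens : List String)
    (h : ∀ c ∈ tokens, c ∈ pvAllowedThemes) :
    PySem.List.sorted (pvAllowedThemes.filter (fun t => t ∈ tokens))
        (fun t => (PySem.List.index? tokens t).getD 0) false
      = PySem.Set.ofList tokens := by
  apply PySem.List.sorted_eq_of_perm_of_pairwise_lt
  · rw [List.perm_ext_iff_of_nodup (PySem.Set.nodup_ofList tokens)
      (List.Nodup.filter _ (by decide))]
    intro a
    simp only [PySem.Set.mem_ofList, List.mem_filter, decide_eq_true_eq]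
    exact ⟨fun hat => ⟨h a hat, hat⟩, fun hp => hp.2⟩
  · exact pvOfList_pairwise_index tokens

-- ===== VERDICT (by name: the statement is the Claim_ definition above) =====
theorem normalize_theme_filters_spec : Claim_equal_normalize_theme_filters := by
  intro values _ hpre
  unfold Spec_normalize_theme_filters
  match values with
  | none => rfl
  | some vs =>
    by_cases hvs : vs = []
    · simp [normalize_theme_filters, normalize_theme_filters_alt, hvs]
    · have hvalid : ∀ raw ∈ vs, ∀ p ∈ pvSplitComma raw,
          pvClean p = "" ∨ pvClean p ∈ pvAllowedThemes := by
        intro raw hraw p hp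
        exact hpre vs rfl raw hraw p hp
      have hcand : ∀ c ∈ pvBTokens vs, c ∈ pvAllowedThemes := by
        intro c hc
        simp only [pvBTokens, List.mem_flatMap, List.mem_filter, List.mem_map] at hc
        obtain ⟨raw, hraw, ⟨⟨p, hp, hpc⟩, hne⟩⟩ := hc
        rcases hvalid raw hraw p hp with h0 | h1
        · subst hpc
          simp [h0] at hne
        · subst hpc; exact h1
      simp only [normalize_theme_filters, normalize_theme_filters_alt, if_neg hvs,
        pvAVals_eq_foldl vs [] PySem.Set.empty hvalid, pvFind?_none _ hcand]
      rw [show (([] : List String), PySem.Set.empty) = (([] : List String), ([] : List String)) from rfl,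
        pvFoldl_step_diag]
      rw [pvDedup_eq_sorted _ hcand]
      simp [PySem.Set.ofList_eq_foldl]
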